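-- pv_equiv track=rewrite | github.com/NAME0x0/AVA | src/output/filter.py | _intensify_punctuation
-- ===== SOURCE A (Python) =====
-- def _intensify_punctuation(text: str) -> str:
--     """Add emotional intensity through punctuation."""
--     # Replace some periods with exclamation marks
--     sentences = text.split(". ")
--     result = []
--
--     for i, sentence in enumerate(sentences):
--         if i == 0 and sentence and sentence[-1] not in "!?":
--             sentence = sentence.rstrip(".") + "!"
--         result.append(sentence)
--
--     return ". ".join(result)
-- ===== SOURCE B (Python) =====
-- def _intensify_punctuation(text: str) -> str:
--     """Add emotional intensity through punctuation."""
--     # Single left-to-right streaming pass: emit characters until the first ". ",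
--     # buffering runs of '.' so trailing periods are never re-scanned; then decide
--     # the '!' from the buffered state alone and append the untouched remainder.
--     out = []
--     dots = 0
--     i, n = 0, len(text)
--     while i < n:
--         c = text[i]
--         if c == '.' and text[i + 1 : i + 2] == ' ':
--             break
--         if c == '.':
--             dots += 1
--         else:
--             if dots:
--                 out.append('.' * dots)
--                 dots = 0
--             out.append(c)
--         i += 1
--     if dots or (out and out[-1] not in '!?'):
--         out.append('!')
--     return ''.join(out) + text[i:]
-- ===== Notes on version B (the rewrite author's own statement) =====
-- stated objective: alternative
-- what changed: B replaces A's split-into-all-sentences / enumerate loop / rstrip / rejoin with one streaming left-to-right pass that buffers runs of '.' and stops at the first '. ', deciding the '!' from the buffered state alone and appending the untouched remainder.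
import Mathlib
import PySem

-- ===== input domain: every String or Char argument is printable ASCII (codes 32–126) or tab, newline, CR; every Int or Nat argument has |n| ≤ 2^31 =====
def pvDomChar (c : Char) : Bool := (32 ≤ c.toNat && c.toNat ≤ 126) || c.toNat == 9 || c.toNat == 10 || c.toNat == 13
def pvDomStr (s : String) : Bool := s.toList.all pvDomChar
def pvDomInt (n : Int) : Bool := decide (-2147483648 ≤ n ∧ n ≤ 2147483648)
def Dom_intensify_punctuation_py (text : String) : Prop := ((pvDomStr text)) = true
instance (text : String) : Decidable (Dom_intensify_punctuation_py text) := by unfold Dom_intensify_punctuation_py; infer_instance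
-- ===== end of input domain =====

-- B replaces A's split/enumerate-loop/rstrip/rejoin with one streaming pass that buffers
-- runs of '.' and stops at the first ". " (objective: alternative algorithm, same cost).


-- hand port of Python str.rstrip("."), exact: removes every trailing '.' character
def pvRstripDot (cs : List Char) : List Char := (cs.reverse.dropWhile (· == '.')).reverse

-- ===== PORT A =====
def intensify_punctuation_py (text : String) : String :=
  let sentences := PySem.Chars.splitOn text.toList ['.', ' ']
  let result := (PySem.List.enumerate sentences 0).foldl
    (fun (acc : List (List Char)) p =>
      let sentence := p.2
      -- 'if i == 0 and sentence and sentence[-1] not in "!?"' (truthiness + last char, exact)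
      let sentence := if p.1 == 0 && (match sentence.getLast? with
          | some c => !(c == '!' || c == '?')
          | none => false) then pvRstripDot sentence ++ ['!'] else sentence
      acc ++ [sentence]) []
  String.ofList (PySem.Chars.join ['.', ' '] result)

-- ===== PORT B =====
-- the while loop of Source B: walk the characters, buffer runs of '.', break at the first ". ";
-- returns (emitted output, buffered dot count, unprocessed remainder text[i:])
def pvGoB : List Char → List Char → Nat → (List Char × Nat × List Char)
  | [], out, dots => (out, dots, [])
  | c :: rest, out, dots =>
    if c == '.' && rest.head? == some ' ' then
      (out, dots, c :: rest)
    else if c == '.' then pvGoB rest out (dots + 1)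
    else pvGoB rest (out ++ List.replicate dots '.' ++ [c]) 0

def intensify_punctuation_py_alt (text : String) : String :=
  let r := pvGoB text.toList [] 0
  -- 'if dots or (out and out[-1] not in "!?"): out.append("!")'
  let out := if r.2.1 ≠ 0 || (match r.1.getLast? with
      | some c => !(c == '!' || c == '?')
      | none => false) then r.1 ++ ['!'] else r.1
  String.ofList (out ++ r.2.2)

-- ===== PRECONDITION & SPEC =====
def Spec_intensify_punctuation_py (text : String) (out : String) : Prop := out = intensify_punctuation_py_alt text
instance (text : String) (out : String) : Decidable (Spec_intensify_punctuation_py text out) := by unfold Spec_intensify_punctuation_py; infer_instance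

-- ===== CLAIM (what is proved, stated in full; the proofs are below) =====
def Claim_equal_intensify_punctuation_py : Prop := ∀ (text : String), Dom_intensify_punctuation_py text → Spec_intensify_punctuation_py text (intensify_punctuation_py text)

-- ===== LEMMAS AND PROOFS =====

-- number of trailing '.' characters
def pvTDots (cs : List Char) : Nat := (cs.reverse.takeWhile (· == '.')).length

-- the guard-and-fix applied to the first sentence (A's loop body at i = 0)
def pvFixH (cs : List Char) : List Char :=
  if (match cs.getLast? with
      | some c => !(c == '!' || c == '?')
      | none => false) then pvRstripDot cs ++ ['!'] else cs

def pvMapHead (f : List Char → List Char) : List (List Char) → List (List Char)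
  | [] => []
  | h :: t => f h :: t

-- structural model of splitOn on the fixed separator ". "
def pvSos : List Char → List (List Char)
  | [] => [[]]
  | c :: rest =>
    if ['.', ' '].isPrefixOf (c :: rest) then [] :: pvSos (rest.drop 1)
    else pvMapHead (c :: ·) (pvSos rest)
termination_by cs => cs.length
decreasing_by
  · simp
  · simp

-- structural model of the index of the first ". "
def pvFnd : List Char → Option Nat
  | [] => none
  | c :: rest =>
    if ['.', ' '].isPrefixOf (c :: rest) then some 0
    else (pvFnd rest).map (· + 1)

theorem pvMapHead_cons (f : List Char → List Char) (h : List Char) (t : List (List Char)) :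
    pvMapHead f (h :: t) = f h :: t := rfl

theorem pvMapHead_nil_append (l : List (List Char)) :
    pvMapHead (fun x => [] ++ x) l = l := by
  cases l <;> simp [pvMapHead]

theorem pvMapHead_id_fn (l : List (List Char)) :
    pvMapHead (fun x => x) l = l := by
  cases l <;> simp [pvMapHead]

theorem pvSos_ne_nil (cs : List Char) : pvSos cs ≠ [] := by
  fun_induction pvSos cs with
  | case1 => simp
  | case2 c rest hp ih => simp [pvSos.eq_2, hp]
  | case3 c rest hp ih =>
    cases h : pvSos rest with
    | nil => exact absurd h ih
    | cons a t => simp [h, pvMapHead]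

theorem pvGoEq : ∀ (fuel : Nat) (l cur : List Char) (acc : List (List Char)),
    l.length < fuel →
    PySem.Chars.splitOn.go ['.', ' '] fuel l cur acc
      = acc.reverse ++ pvMapHead (cur.reverse ++ ·) (pvSos l) := by
  intro fuel
  induction fuel with
  | zero => intro l cur acc h; omega
  | succ fuel ih =>
    intro l cur acc h
    cases l with
    | nil => simp [PySem.Chars.splitOn.go, pvSos, pvMapHead]
    | cons c rest =>
      rw [PySem.Chars.splitOn.go]
      by_cases hp : ['.', ' '].isPrefixOf (c :: rest) = true
      · rw [if_pos hp, ih _ _ _ (by simp at h ⊢; omega)]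
        rw [pvSos.eq_2, if_pos hp]
        simp [pvMapHead_nil_append, pvMapHead_cons, pvMapHead_id_fn]
      · rw [if_neg hp, ih _ _ _ (by simp at h ⊢; omega)]
        rw [pvSos.eq_2, if_neg hp]
        cases hs : pvSos rest with
        | nil => exact absurd hs (pvSos_ne_nil rest)
        | cons a t => simp [pvMapHead]

theorem pvSplitOn_eq_sos (cs : List Char) :
    PySem.Chars.splitOn cs ['.', ' '] = pvSos cs := by
  rw [PySem.Chars.splitOn, pvGoEq (cs.length + 1) cs [] [] (by omega)]
  simp only [List.reverse_nil, List.nil_append, pvMapHead_nil_append, pvMapHead_id_fn]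

theorem pvJoin_mapHead_cons (c : Char) (l : List (List Char)) (h : l ≠ []) :
    PySem.Chars.join ['.', ' '] (pvMapHead (c :: ·) l) = c :: PySem.Chars.join ['.', ' '] l := by
  cases l with
  | nil => exact absurd rfl h
  | cons a t =>
    cases t with
    | nil => simp [pvMapHead, PySem.Chars.join_singleton]
    | cons b t => simp [pvMapHead, PySem.Chars.join_cons_cons]

theorem pvJoin_sos (cs : List Char) : PySem.Chars.join ['.', ' '] (pvSos cs) = cs := by
  fun_induction pvSos cs with
  | case1 => simp [PySem.Chars.join_singleton]
  | case2 c rest hp ih =>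
    cases hs : pvSos (rest.drop 1) with
    | nil => exact absurd hs (pvSos_ne_nil _)
    | cons a t =>
      rw [PySem.Chars.join_cons_cons, ← hs, ih]
      cases rest with
      | nil => simp [List.isPrefixOf] at hp
      | cons r rs =>
        simp [List.isPrefixOf] at hp
        obtain ⟨rfl, rfl⟩ := hp
        simp
  | case3 c rest hp ih =>
    rw [pvJoin_mapHead_cons c _ (pvSos_ne_nil rest), ih]

theorem pvSos_fnd_none (cs : List Char) (h : pvFnd cs = none) : pvSos cs = [cs] := by
  fun_induction pvFnd cs with
  | case1 => simp [pvSos]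
  | case2 c rest hp => simp at h
  | case3 c rest hp ih =>
    simp only [Option.map_eq_none_iff] at h
    rw [pvSos.eq_2, if_neg hp, ih h, pvMapHead_cons]

theorem pvSos_fnd_some (cs : List Char) (n : Nat) (h : pvFnd cs = some n) :
    pvSos cs = cs.take n :: pvSos (cs.drop (n + 2)) := by
  induction cs using pvFnd.induct generalizing n with
  | case1 => simp [pvFnd] at h
  | case2 c rest hp =>
    rw [pvFnd, if_pos hp] at h
    obtain rfl : n = 0 := by simpa using h.symm
    rw [pvSos.eq_2, if_pos hp]
    simp
  | case3 c rest hp ih =>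
    rw [pvFnd, if_neg hp] at h
    obtain ⟨m, hm, rfl⟩ := Option.map_eq_some_iff.mp h
    rw [pvSos.eq_2, if_neg hp, ih m hm, pvMapHead_cons]
    simp [List.take_succ_cons, List.drop_succ_cons, Nat.add_right_comm]

theorem pvFnd_drop (cs : List Char) (n : Nat) (h : pvFnd cs = some n) :
    cs.drop n = '.' :: ' ' :: cs.drop (n + 2) := by
  induction cs using pvFnd.induct generalizing n with
  | case1 => simp [pvFnd] at h
  | case2 c rest hp =>
    rw [pvFnd, if_pos hp] at h
    obtain rfl : n = 0 := by simpa using h.symm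
    cases rest with
    | nil => simp [List.isPrefixOf] at hp
    | cons r rs =>
      simp [List.isPrefixOf] at hp
      obtain ⟨rfl, rfl⟩ := hp
      simp
  | case3 c rest hp ih =>
    rw [pvFnd, if_neg hp] at h
    obtain ⟨m, hm, rfl⟩ := Option.map_eq_some_iff.mp h
    simpa [List.drop_succ_cons, Nat.add_right_comm] using ih m hm

theorem pvRstrip_replicate (d : Nat) : pvRstripDot (List.replicate d '.') = [] := by
  unfold pvRstripDot
  rw [List.reverse_replicate]
  induction d with
  | zero => simp
  | succ d ih => simpa [List.replicate_succ, List.dropWhile] using ih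

theorem pvTDots_replicate (d : Nat) : pvTDots (List.replicate d '.') = d := by
  unfold pvTDots
  rw [List.reverse_replicate]
  induction d with
  | zero => simp
  | succ d ih => simpa [List.replicate_succ, List.takeWhile] using ih

theorem pvTakeWhile_block (p : Char → Bool) (c : Char) (hc : p c = false) :
    ∀ (ys zs : List Char), (ys ++ c :: zs).takeWhile p = ys.takeWhile p := by
  intro ys zs
  induction ys with
  | nil => simp [List.takeWhile, hc]
  | cons y ys ih =>
    simp only [List.cons_append, List.takeWhile]
    cases p y <;> simp_all

theorem pvDropWhile_block (p : Char → Bool) (c : Char) (hc : p c = false) :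
    ∀ (ys zs : List Char), (ys ++ c :: zs).dropWhile p = ys.dropWhile p ++ c :: zs := by
  intro ys zs
  induction ys with
  | nil => simp [List.dropWhile, hc]
  | cons y ys ih =>
    simp only [List.cons_append, List.dropWhile]
    cases p y <;> simp_all

theorem pvRstrip_mid (l X : List Char) (c : Char) (hc : (c == '.') = false) :
    pvRstripDot (l ++ c :: X) = l ++ c :: pvRstripDot X := by
  unfold pvRstripDot
  rw [List.reverse_append, List.reverse_cons, List.append_assoc, List.singleton_append,
      pvDropWhile_block _ c hc]
  simp

theorem pvTDots_mid (l X : List Char) (c : Char) (hc : (c == '.') = false) :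
    pvTDots (l ++ c :: X) = pvTDots X := by
  unfold pvTDots
  rw [List.reverse_append, List.reverse_cons, List.append_assoc, List.singleton_append,
      pvTakeWhile_block _ c hc]

-- characterization of Source B's loop: output = input with the head's trailing dots buffered
theorem pvGoB_eq (cs : List Char) : ∀ (out : List Char) (dots : Nat),
    pvGoB cs out dots =
      match pvFnd cs with
      | none => (out ++ pvRstripDot (List.replicate dots '.' ++ cs),
                 pvTDots (List.replicate dots '.' ++ cs), [])
      | some n => (out ++ pvRstripDot (List.replicate dots '.' ++ cs.take n),
                   pvTDots (List.replicate dots '.' ++ cs.take n), cs.drop n) := by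
  induction cs using pvFnd.induct with
  | case1 =>
    intro out dots
    simp [pvGoB, pvFnd, pvRstrip_replicate, pvTDots_replicate]
  | case2 c rest hp =>
    intro out dots
    cases rest with
    | nil => simp [List.isPrefixOf] at hp
    | cons r rs =>
      have hp' := hp
      simp [List.isPrefixOf] at hp'
      obtain ⟨rfl, rfl⟩ := hp'
      rw [pvGoB, if_pos (by simp), pvFnd, if_pos hp]
      simp [pvRstrip_replicate, pvTDots_replicate]
  | case3 c rest hp ih =>
    intro out dots
    have hsep : (c == '.' && rest.head? == some ' ') = false := by
      cases rest with
      | nil => simp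
      | cons r rs =>
        simp [List.isPrefixOf] at hp ⊢
        intro hc' hr'
        exact hp hc'.symm hr'.symm
    rw [pvGoB, if_neg (by simp [hsep]), pvFnd, if_neg hp]
    by_cases hdot : (c == '.') = true
    · obtain rfl : c = '.' := by simpa using hdot
      rw [if_pos hdot, ih out (dots + 1)]
      have hrep : ∀ X : List Char, List.replicate (dots + 1) '.' ++ X
          = List.replicate dots '.' ++ '.' :: X := by
        intro X; rw [List.replicate_succ']; simp
      cases hf : pvFnd rest with
      | none => simp [hrep]
      | some m => simp [hrep, List.take_succ_cons, List.drop_succ_cons]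
    · rw [if_neg hdot, ih (out ++ List.replicate dots '.' ++ [c]) 0]
      have hc : (c == '.') = false := by simpa using hdot
      cases hf : pvFnd rest with
      | none =>
        simp only [List.replicate_zero, List.nil_append]
        rw [pvRstrip_mid _ _ _ hc, pvTDots_mid _ _ _ hc]
        simp
      | some m =>
        simp
        exact ⟨(pvRstrip_mid _ _ _ hc).symm, (pvTDots_mid _ _ _ hc).symm⟩

theorem pvTDots_zero_rstrip (h : List Char) (hz : pvTDots h = 0) : pvRstripDot h = h := by
  unfold pvTDots at hz
  unfold pvRstripDot
  cases hr : h.reverse with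
  | nil => simpa using congrArg List.reverse hr
  | cons r rs =>
    rw [hr] at hz
    rw [List.takeWhile] at hz
    cases hp : (r == '.') with
    | true => simp [hp] at hz
    | false =>
      have hdw : List.dropWhile (fun x => x == '.') (r :: rs) = r :: rs := by
        simp [List.dropWhile_cons, hp]
      rw [hdw, ← hr, List.reverse_reverse]

theorem pvTDots_ne_zero_last (h : List Char) (hz : pvTDots h ≠ 0) : h.getLast? = some '.' := by
  unfold pvTDots at hz
  rw [← List.head?_reverse]
  cases hr : h.reverse with
  | nil => simp [hr] at hz
  | cons r rs =>
    rw [hr, List.takeWhile] at hz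
    cases hp : (r == '.') with
    | true => simpa using hp
    | false => simp [hp] at hz

-- B's append-'!' decision applied to (rstrip h, tdots h) equals A's fix of h
theorem pvFix_assemble (h : List Char) :
    (if pvTDots h ≠ 0 || (match (pvRstripDot h).getLast? with
        | some c => !(c == '!' || c == '?')
        | none => false) then pvRstripDot h ++ ['!'] else pvRstripDot h) = pvFixH h := by
  by_cases hz : pvTDots h = 0
  · rw [pvFixH, pvTDots_zero_rstrip h hz]
    simp [hz]
  · have hl := pvTDots_ne_zero_last h hz
    rw [pvFixH, hl]
    simp [hz]

theorem pvFoldlAppendAux (h : Int × List Char → List Char)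
    (l : List (Int × List Char)) (a : List (List Char)) :
    l.foldl (fun acc p => acc ++ [h p]) a = a ++ l.map h := by
  induction l generalizing a with
  | nil => simp
  | cons x xs ih => simp [List.foldl_cons, ih]

theorem pvMapEnumAux (h : Int × List Char → List Char)
    (hfix : ∀ p : Int × List Char, p.1 ≠ 0 → h p = p.2) :
    ∀ (xs : List (List Char)) (s : Int), 1 ≤ s → (PySem.List.enumerate xs s).map h = xs := by
  intro xs
  induction xs with
  | nil => intro s _; simp [PySem.List.enumerate]
  | cons x xs ih =>
    intro s hs
    rw [PySem.List.enumerate_cons, List.map_cons, hfix (s, x) (by omega), ih (s+1) (by omega)]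

theorem pvPortA_eq (text : String) :
    intensify_punctuation_py text
      = String.ofList (PySem.Chars.join ['.', ' '] (pvMapHead pvFixH (pvSos text.toList))) := by
  rw [intensify_punctuation_py]
  rw [pvSplitOn_eq_sos, pvFoldlAppendAux]
  congr 1
  cases hs : pvSos text.toList with
  | nil => exact absurd hs (pvSos_ne_nil _)
  | cons a t =>
    rw [PySem.List.enumerate_cons, List.map_cons,
        pvMapEnumAux _ (by intro p hp; simp [hp]) t (0 + 1) (by norm_num), pvMapHead_cons]
    simp [pvFixH]

-- ===== VERDICT (by name: the statement is the Claim_ definition above) =====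
theorem intensify_punctuation_py_spec : Claim_equal_intensify_punctuation_py := by
  intro text _
  unfold Spec_intensify_punctuation_py
  rw [pvPortA_eq, intensify_punctuation_py_alt]
  simp only [pvGoB_eq text.toList [] 0, List.replicate_zero, List.nil_append]
  cases hf : pvFnd text.toList with
  | none =>
    rw [pvSos_fnd_none _ hf]
    simp only [List.nil_append, pvFix_assemble]
    simp [pvMapHead, List.intercalate, PySem.Chars.join]
  | some n =>
    rw [pvSos_fnd_some _ _ hf, pvMapHead_cons]
    cases hs : pvSos (text.toList.drop (n + 2)) with
    | nil => exact absurd hs (pvSos_ne_nil _)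
    | cons a t =>
      rw [PySem.Chars.join_cons_cons, ← hs, pvJoin_sos]
      simp only [List.nil_append, pvFix_assemble]
      rw [pvFnd_drop _ _ hf]
      simp
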